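-- pv_equiv track=rewrite | github.com/kiryong-lee/Algorithm | programmers/118666.py | solution
-- ===== SOURCE A (Python) =====
-- from collections import defaultdict
--
-- def solution(survey, choices):
--
--     type_dict = defaultdict(int)
--     for s, c in zip(survey, choices):
--         if c > 4:
--             if s[1] in type_dict:
--                 type_dict[s[1]] += c - 4
--             else:
--                 type_dict[s[1]] = c - 4
--         elif c < 4:
--             if s[0] in type_dict:
--                 type_dict[s[0]] += 4 - c
--             else:
--                 type_dict[s[0]] = 4 - c
--
--     answer = ''
--     if type_dict['R'] < type_dict['T']:
--         answer += 'T'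
--     else:
--         answer += 'R'
--
--     if type_dict['C'] < type_dict['F']:
--         answer += 'F'
--     else:
--         answer += 'C'
--
--     if type_dict['J'] < type_dict['M']:
--         answer += 'M'
--     else:
--         answer += 'J'
--
--     if type_dict['A'] < type_dict['N']:
--         answer += 'N'
--     else:
--         answer += 'A'
--
--     return answer
-- ===== SOURCE B (Python) =====
-- def solution(survey, choices):
--     # Four independent per-axis scans: net = (score of left letter) - (score of right letter);
--     # pick the left letter on net >= 0 (ties go left), else the right letter.
--     def net(l, r):
--         t = 0
--         for s, c in zip(survey, choices):
--             if c > 4: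
--                 if s[1] == l:
--                     t += c - 4
--                 elif s[1] == r:
--                     t -= c - 4
--             elif c < 4:
--                 if s[0] == l:
--                     t += 4 - c
--                 elif s[0] == r:
--                     t -= 4 - c
--         return t
--     return ''.join(l if net(l, r) >= 0 else r
--                    for l, r in (('R', 'T'), ('C', 'F'), ('J', 'M'), ('A', 'N')))
-- ===== Notes on version B (the rewrite author's own statement) =====
-- stated objective: alternative
-- what changed: Replaces A's single dict-tally pass (defaultdict keyed by arbitrary letters, then four threshold lookups) with four independent dict-free scans, one per axis, each accumulating a signed net weight and picking the left letter iff the net is >= 0.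
-- outside the precondition, e.g. on solution([''], [1]): A raises IndexError, B raises IndexError
import Mathlib
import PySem

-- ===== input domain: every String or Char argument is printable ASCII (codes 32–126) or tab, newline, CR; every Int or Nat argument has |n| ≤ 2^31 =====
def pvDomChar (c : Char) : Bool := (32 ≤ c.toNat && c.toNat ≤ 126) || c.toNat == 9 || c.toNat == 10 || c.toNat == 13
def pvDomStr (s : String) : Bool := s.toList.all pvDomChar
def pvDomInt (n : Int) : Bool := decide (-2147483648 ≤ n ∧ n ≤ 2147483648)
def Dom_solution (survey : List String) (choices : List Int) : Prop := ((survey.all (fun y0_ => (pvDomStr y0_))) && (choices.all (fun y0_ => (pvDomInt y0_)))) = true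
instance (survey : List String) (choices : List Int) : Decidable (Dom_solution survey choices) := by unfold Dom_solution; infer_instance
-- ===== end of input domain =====

-- B replaces A's single dict-tally pass by four independent dict-free per-axis scans
-- accumulating a signed net weight; objective: alternative (same cost, different structure).


-- ===== PORT A =====
-- one loop step of A's tally; s[1]/s[0] via PySem.Str.pyGet? (none = IndexError, excluded by Pre_solution; the none branch is unreachable inside Pre_)
def stepA (d : PySem.Dict Char Int) (p : String × Int) : PySem.Dict Char Int :=
  if p.2 > 4 then
    match PySem.Str.pyGet? p.1 1 with
    | some k => if d.contains k then d.modify k 0 (· + (p.2 - 4)) else d.insert k (p.2 - 4)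
    | none => d
  else if p.2 < 4 then
    match PySem.Str.pyGet? p.1 0 with
    | some k => if d.contains k then d.modify k 0 (· + (4 - p.2)) else d.insert k (4 - p.2)
    | none => d
  else d

-- defaultdict lookup type_dict['R'] reads 0 for a missing key: getD _ 0 (its side effect of storing 0 never changes a later read)
def solution (survey : List String) (choices : List Int) : String :=
  let d := (survey.zip choices).foldl stepA PySem.Dict.empty
  String.mk
    [ (if d.getD 'R' 0 < d.getD 'T' 0 then 'T' else 'R'),
      (if d.getD 'C' 0 < d.getD 'F' 0 then 'F' else 'C'),
      (if d.getD 'J' 0 < d.getD 'M' 0 then 'M' else 'J'),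
      (if d.getD 'A' 0 < d.getD 'N' 0 then 'N' else 'A') ]

-- ===== PORT B =====
-- loop body of one per-axis scan of B
def stepB (l r : Char) (t : Int) (p : String × Int) : Int :=
  if p.2 > 4 then
    match PySem.Str.pyGet? p.1 1 with
    | some k => if k = l then t + (p.2 - 4) else if k = r then t - (p.2 - 4) else t
    | none => t
  else if p.2 < 4 then
    match PySem.Str.pyGet? p.1 0 with
    | some k => if k = l then t + (4 - p.2) else if k = r then t - (4 - p.2) else t
    | none => t
  else t

def netB (survey : List String) (choices : List Int) (l r : Char) : Int :=
  (survey.zip choices).foldl (stepB l r) 0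

def solution_alt (survey : List String) (choices : List Int) : String :=
  String.mk ([('R','T'),('C','F'),('J','M'),('A','N')].map
    (fun p => if 0 ≤ netB survey choices p.1 p.2 then p.1 else p.2))

-- ===== PRECONDITION & SPEC =====
-- Pre_ excludes exactly the inputs where Python A raises IndexError: a zipped pair whose
-- answer c needs s[1] (c>4) or s[0] (c<4) that the string does not have.
def Pre_solution (survey : List String) (choices : List Int) : Prop :=
  ∀ p ∈ survey.zip choices,
    (p.2 > 4 → 2 ≤ p.1.toList.length) ∧ (p.2 < 4 → 1 ≤ p.1.toList.length)
instance (survey : List String) (choices : List Int) : Decidable (Pre_solution survey choices) := by unfold Pre_solution; infer_instance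

def pvWitness_solution : List String × List Int := (["RT","CF","JM","AN"], [1, 2, 6, 4])

def Spec_solution (survey : List String) (choices : List Int) (out : String) : Prop := out = solution_alt survey choices
instance (survey : List String) (choices : List Int) (out : String) : Decidable (Spec_solution survey choices out) := by unfold Spec_solution; infer_instance

-- ===== CLAIM (what is proved, stated in full; the proofs are below) =====
def Claim_equal_solution : Prop := ∀ (survey : List String) (choices : List Int), Dom_solution survey choices → Pre_solution survey choices → Spec_solution survey choices (solution survey choices)

-- ===== LEMMAS AND PROOFS =====

/-- contribution of one zipped pair to the tally of letter `x` -/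
def contrib (x : Char) (p : String × Int) : Int :=
  if p.2 > 4 then (if PySem.Str.pyGet? p.1 1 = some x then p.2 - 4 else 0)
  else if p.2 < 4 then (if PySem.Str.pyGet? p.1 0 = some x then 4 - p.2 else 0)
  else 0

theorem getD_stepA (d : PySem.Dict Char Int) (p : String × Int) (x : Char) :
    (stepA d p).getD x 0 = d.getD x 0 + contrib x p := by
  by_cases h1 : p.2 > 4
  · simp only [stepA, contrib, if_pos h1]
    cases hk : PySem.Str.pyGet? p.1 1 with
    | none => simp
    | some k =>
      by_cases hc : d.contains k
      · by_cases hx : x = k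
        · subst hx; simp [hc, PySem.Dict.getD_modify]
        · simp [hc, PySem.Dict.getD_modify, hx, Ne.symm hx]
      · simp only [Bool.not_eq_true] at hc
        by_cases hx : x = k
        · subst hx
          simp [hc, PySem.Dict.getD_insert, PySem.Dict.getD_of_not_contains d 0 hc]
        · simp [hc, PySem.Dict.getD_insert, hx, Ne.symm hx]
  · by_cases h2 : p.2 < 4
    · simp only [stepA, contrib, if_neg h1, if_pos h2]
      cases hk : PySem.Str.pyGet? p.1 0 with
      | none => simp
      | some k =>
        by_cases hc : d.contains k
        · by_cases hx : x = k
          · subst hx; simp [hc, PySem.Dict.getD_modify]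
          · simp [hc, PySem.Dict.getD_modify, hx, Ne.symm hx]
        · simp only [Bool.not_eq_true] at hc
          by_cases hx : x = k
          · subst hx
            simp [hc, PySem.Dict.getD_insert, PySem.Dict.getD_of_not_contains d 0 hc]
          · simp [hc, PySem.Dict.getD_insert, hx, Ne.symm hx]
    · simp [stepA, contrib, h1, h2]

theorem getD_foldA (ps : List (String × Int)) (d : PySem.Dict Char Int) (x : Char) :
    (ps.foldl stepA d).getD x 0 = d.getD x 0 + (ps.map (contrib x)).sum := by
  induction ps generalizing d with
  | nil => simp
  | cons p ps ih =>
    simp only [List.foldl_cons, List.map_cons, List.sum_cons, ih, getD_stepA]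
    ring

theorem stepB_eq (l r : Char) (hlr : l ≠ r) (t : Int) (p : String × Int) :
    stepB l r t p = t + contrib l p - contrib r p := by
  by_cases h1 : p.2 > 4
  · simp only [stepB, contrib, if_pos h1]
    cases hk : PySem.Str.pyGet? p.1 1 with
    | none => simp
    | some k =>
      by_cases hl : k = l
      · subst hl; simp [hlr]
      · by_cases hr : k = r
        · subst hr; simp [hl, Ne.symm hl]
        · simp [hl, hr, Ne.symm hl, Ne.symm hr]
  · by_cases h2 : p.2 < 4
    · simp only [stepB, contrib, if_neg h1, if_pos h2]
      cases hk : PySem.Str.pyGet? p.1 0 with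
      | none => simp
      | some k =>
        by_cases hl : k = l
        · subst hl; simp [hlr]
        · by_cases hr : k = r
          · subst hr; simp [hl, Ne.symm hl]
          · simp [hl, hr, Ne.symm hl, Ne.symm hr]
    · simp [stepB, contrib, h1, h2]

theorem foldB_eq (l r : Char) (hlr : l ≠ r) (ps : List (String × Int)) (t : Int) :
    ps.foldl (stepB l r) t = t + (ps.map (contrib l)).sum - (ps.map (contrib r)).sum := by
  induction ps generalizing t with
  | nil => simp
  | cons p ps ih =>
    simp only [List.foldl_cons, List.map_cons, List.sum_cons, ih, stepB_eq l r hlr]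
    ring

theorem axis_eq (survey : List String) (choices : List Int) (l r : Char) (hlr : l ≠ r) :
    (if 0 ≤ netB survey choices l r then l else r) =
      (if ((survey.zip choices).foldl stepA PySem.Dict.empty).getD l 0 <
           ((survey.zip choices).foldl stepA PySem.Dict.empty).getD r 0 then r else l) := by
  rw [netB, foldB_eq l r hlr, getD_foldA, getD_foldA]
  simp only [PySem.Dict.getD_empty]
  split_ifs with h1 h2 h2 <;> first | rfl | omega

-- ===== VERDICT (by name: the statement is the Claim_ definition above) =====
theorem solution_spec : Claim_equal_solution := by
  intro survey choices _ _
  unfold Spec_solution solution solution_alt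
  simp only [List.map_cons, List.map_nil]
  rw [← axis_eq survey choices 'R' 'T' (by decide), ← axis_eq survey choices 'C' 'F' (by decide),
      ← axis_eq survey choices 'J' 'M' (by decide), ← axis_eq survey choices 'A' 'N' (by decide)]
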